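-- pv_equiv track=rewrite | github.com/XronAce/python-study | Algorithm_with_Codeit/GA_Min_Fee.py | min_fee
-- ===== SOURCE A (Python) =====
-- def min_fee(pages_to_print):
--     pages_to_print = sorted(pages_to_print)
--     i = 1
--     fee = 0
--
--     while i < len(pages_to_print)+1:
--         for j in range(0, i):
--             fee += pages_to_print[j]
--         i += 1
--
--     return fee
-- ===== SOURCE B (Python) =====
-- def min_fee(pages_to_print):
--     pages = sorted(pages_to_print)
--     n = len(pages)
--     fee = 0
--     for j, p in enumerate(pages):
--         fee += (n - j) * p
--     return fee
-- ===== Notes on version B (the rewrite author's own statement) =====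
-- stated objective: faster
-- what changed: Replaces A's quadratic loop of repeated prefix-sum accumulation over the sorted list by a single weighted-sum pass fee += (n-j)*pages[j].
import Mathlib
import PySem

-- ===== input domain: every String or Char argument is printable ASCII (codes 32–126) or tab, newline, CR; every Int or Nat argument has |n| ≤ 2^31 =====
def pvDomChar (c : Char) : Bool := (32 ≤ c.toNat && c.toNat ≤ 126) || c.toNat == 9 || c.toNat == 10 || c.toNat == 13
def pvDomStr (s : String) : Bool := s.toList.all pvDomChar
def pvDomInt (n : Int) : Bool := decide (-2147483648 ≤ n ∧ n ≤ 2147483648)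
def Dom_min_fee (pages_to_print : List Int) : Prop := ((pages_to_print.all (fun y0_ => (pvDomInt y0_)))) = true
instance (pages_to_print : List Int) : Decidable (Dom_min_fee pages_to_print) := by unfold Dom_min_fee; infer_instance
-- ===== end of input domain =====

-- B replaces A's quadratic repeated prefix-sum loop over the sorted list by one weighted-sum pass (n-j)*pages[j]; measured asymptotically faster.


-- ===== PORT A =====
def min_fee (pages_to_print : List Int) : Int :=
  let pages := PySem.List.sorted pages_to_print (fun x => x)
  (PySem.List.pyRange 1 (PySem.List.len pages + 1)).foldl
    (fun fee i =>
      (PySem.List.pyRange 0 i).foldl (fun fee j => fee + PySem.List.pyGetD pages j 0) fee) 0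

-- ===== PORT B =====
def min_fee_alt (pages_to_print : List Int) : Int :=
  let pages := PySem.List.sorted pages_to_print (fun x => x)
  let n := PySem.List.len pages
  (PySem.List.enumerate pages).foldl (fun fee jp => fee + (n - jp.1) * jp.2) 0

-- ===== PRECONDITION & SPEC =====
def Spec_min_fee (pages_to_print : List Int) (out : Int) : Prop := out = min_fee_alt pages_to_print
instance (pages_to_print : List Int) (out : Int) : Decidable (Spec_min_fee pages_to_print out) := by unfold Spec_min_fee; infer_instance

-- ===== CLAIM (what is proved, stated in full; the proofs are below) =====
def Claim_equal_min_fee : Prop := ∀ (pages_to_print : List Int), Dom_min_fee pages_to_print → Spec_min_fee pages_to_print (min_fee pages_to_print)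

-- ===== LEMMAS AND PROOFS =====

-- A's inner 'for j in range(0, i)' adds the first k elements of the sorted list.
lemma mf_inner (s : List Int) : ∀ (k : Nat) (fee : Int), k ≤ s.length →
    (PySem.List.pyRange 0 (k : Int)).foldl (fun fee j => fee + PySem.List.pyGetD s j 0) fee
      = fee + (s.take k).sum := by
  intro k
  induction k with
  | zero => intro fee _; simp [PySem.List.pyRange_one_eq_nil]
  | succ k ih =>
    intro fee hk
    have h1 : ((k + 1 : Nat) : Int) = (k : Int) + 1 := by push_cast; ring
    rw [h1, PySem.List.pyRange_one_succ_right (by positivity), List.foldl_append,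
      ih fee (by omega)]
    simp only [List.foldl]
    rw [List.sum_take_succ s k (by omega)]
    have hget : PySem.List.pyGetD s (k : Int) 0 = s[k]'(by omega) := by
      rw [PySem.List.pyGetD_natCast, List.getD_eq_getElem?_getD,
        List.getElem?_eq_getElem (by omega : k < s.length)]
      rfl
    rw [hget]
    ring

-- A's outer loop is the sum of the prefix sums.
lemma mf_a_side (s : List Int) :
    (PySem.List.pyRange 1 ((s.length : Int) + 1)).foldl
      (fun fee i =>
        (PySem.List.pyRange 0 i).foldl (fun fee j => fee + PySem.List.pyGetD s j 0) fee) 0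
      = ((List.range s.length).map (fun k => (s.take (k + 1)).sum)).sum := by
  rw [PySem.List.foldl_congr_mem _ _ (fun fee i => fee + (s.take i.toNat).sum) 0 ?_]
  · rw [PySem.List.foldl_add, PySem.List.pyRange_one, List.map_map]
    have h2 : ((s.length : Int) + 1 - 1).toNat = s.length := by omega
    rw [h2, zero_add]
    refine congrArg List.sum (List.map_congr_left ?_)
    intro k _
    have h3 : ((1 : Int) + (k : Int)).toNat = k + 1 := by omega
    simp [h3]
  · intro fee i hi
    have hmem := (PySem.List.mem_pyRange_one).1 hi
    have hi' : i = ((i.toNat : Nat) : Int) := by omega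
    rw [hi']
    exact mf_inner s i.toNat fee (by omega)

-- B's loop is the weighted sum over zipIdx.
lemma mf_b_side (s : List Int) :
    (PySem.List.enumerate s).foldl (fun fee jp => fee + ((s.length : Int) - jp.1) * jp.2) 0
      = (s.zipIdx.map (fun p => ((s.length : Int) - (p.2 : Int)) * p.1)).sum := by
  rw [PySem.List.enumerate_eq_zipIdx_map, PySem.List.foldl_add, List.map_map, zero_add]
  refine congrArg List.sum (List.map_congr_left ?_)
  intro p _
  simp

-- Sum of prefix sums = weighted sum, with a general zipIdx start for the induction.
lemma mf_core : ∀ (s : List Int) (m : Nat),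
    ((List.range s.length).map (fun k => (s.take (k + 1)).sum)).sum
      = ((s.zipIdx m).map (fun p => (((m : Int) + (s.length : Int)) - (p.2 : Int)) * p.1)).sum := by
  intro s
  induction s with
  | nil => intro m; simp
  | cons a t ih =>
    intro m
    rw [List.zipIdx_cons]
    simp only [List.length_cons]
    rw [List.range_succ_eq_map]
    simp only [List.map_cons, List.sum_cons, List.map_map]
    have hfn : List.map ((fun k => (List.take (k + 1) (a :: t)).sum) ∘ Nat.succ)
          (List.range t.length)
        = List.map (fun k => a + (t.take (k + 1)).sum) (List.range t.length) := by
      apply List.map_congr_left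
      intro k _
      simp [List.take_succ_cons]
    have ih' := ih (m + 1)
    have hmap : List.map (fun p => (((m + 1 : Nat) : Int) + (t.length : Int) - (p.2 : Int)) * p.1)
          (t.zipIdx (m + 1))
        = List.map (fun p => ((m : Int) + ((t.length + 1 : Nat) : Int) - (p.2 : Int)) * p.1)
          (t.zipIdx (m + 1)) := by
      apply List.map_congr_left
      intro p _
      push_cast
      ring
    rw [hmap] at ih'
    rw [hfn, PySem.List.sum_map_add_int, PySem.List.sum_map_const_int, ih']
    simp only [List.take_succ_cons, List.take_zero, List.sum_cons, List.sum_nil,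
      List.length_range]
    push_cast
    ring

lemma mf_core0 (s : List Int) :
    ((List.range s.length).map (fun k => (s.take (k + 1)).sum)).sum
      = (s.zipIdx.map (fun p => ((s.length : Int) - (p.2 : Int)) * p.1)).sum := by
  have h := mf_core s 0
  simpa using h

-- ===== VERDICT (by name: the statement is the Claim_ definition above) =====
theorem min_fee_spec : Claim_equal_min_fee := by
  intro xs _
  unfold Spec_min_fee min_fee min_fee_alt
  simp only [PySem.List.len_eq]
  rw [mf_a_side, mf_b_side, mf_core0]
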